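-- pv_equiv track=rewrite | github.com/Joeputin100/Library_Barcode | archive/mle_star_optimization.py | _optimize_execution_order
-- ===== SOURCE A (Python) =====
-- from typing import Dict, List, Any
--
-- def _optimize_execution_order(rules: List[str]) -> List[str]:
--     """Optimize rule execution order"""
--     # Prioritize high-confidence sources first
--     priority_order = [
--         "vertex_ai_data",    # Highest confidence
--         "google_books_data", # High confidence
--         "loc_data",          # Medium confidence
--         "open_library_data", # Lower confidence
--         "marc_record"        # Base data
--     ]
--
--     prioritized_rules = []
--     for source in priority_order:
--         for rule in rules:
--             if source in rule:
--                 prioritized_rules.append(rule)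
--
--     # Add remaining rules
--     for rule in rules:
--         if rule not in prioritized_rules:
--             prioritized_rules.append(rule)
--
--     return prioritized_rules
-- ===== SOURCE B (Python) =====
-- def _optimize_execution_order(rules):
--     """Optimize rule execution order (single-pass classification re-implementation).
--
--     Key fact: a rule appears in A's prioritized block iff it contains some
--     priority source (string equality preserves that property), so the
--     remainder is exactly the non-matching rules, first occurrence each.
--     One pass classifies every rule once; no membership test against the
--     output is ever made.
--     """
--     priority_order = [
--         "vertex_ai_data",
--         "google_books_data",
--         "loc_data",
--         "open_library_data",
--         "marc_record",
--     ]
--     buckets = [[] for _ in priority_order]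
--     rest = []
--     seen = set()
--     for rule in rules:
--         matched = False
--         for i, source in enumerate(priority_order):
--             if source in rule:
--                 buckets[i].append(rule)
--                 matched = True
--         if not matched and rule not in seen:
--             rest.append(rule)
--             seen.add(rule)
--     out = []
--     for b in buckets:
--         out += b
--     return out + rest
-- ===== Notes on version B (the rewrite author's own statement) =====
-- stated objective: faster
-- what changed: B makes a single pass that classifies each rule once into per-source buckets plus a deduped remainder of non-matching rules (exploiting that a rule is in A's prioritized block iff it contains some source), instead of A's five scans of rules followed by a membership scan of the growing output per rule.
import Mathlib
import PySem

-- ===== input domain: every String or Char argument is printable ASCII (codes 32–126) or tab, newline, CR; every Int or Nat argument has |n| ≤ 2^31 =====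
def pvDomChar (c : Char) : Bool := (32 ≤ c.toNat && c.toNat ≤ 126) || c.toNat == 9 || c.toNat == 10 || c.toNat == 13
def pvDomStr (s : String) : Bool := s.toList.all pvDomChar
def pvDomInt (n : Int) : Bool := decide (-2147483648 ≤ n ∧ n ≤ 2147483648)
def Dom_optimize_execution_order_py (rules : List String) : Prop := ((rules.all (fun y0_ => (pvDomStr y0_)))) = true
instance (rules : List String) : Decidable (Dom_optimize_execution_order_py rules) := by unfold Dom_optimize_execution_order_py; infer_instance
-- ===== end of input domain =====

-- B classifies each rule once in a single pass (per-source buckets + a deduped remainder of the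
-- non-matching rules), instead of A's five scans plus a membership scan of the growing output;
-- same return value.

-- ===== PORT A =====
def optimize_execution_order_py (rules : List String) : List String :=
  let priority_order : List String :=
    ["vertex_ai_data", "google_books_data", "loc_data", "open_library_data", "marc_record"]
  let prioritized_rules : List String :=
    priority_order.foldl (fun acc source =>
      rules.foldl (fun acc rule =>
        if PySem.Str.isIn source rule then acc ++ [rule] else acc) acc) []
  rules.foldl (fun acc rule =>
    if acc.contains rule then acc else acc ++ [rule]) prioritized_rules

-- ===== PORT B =====
def optimize_execution_order_py_alt (rules : List String) : List String :=
  let priority_order : List String :=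
    ["vertex_ai_data", "google_books_data", "loc_data", "open_library_data", "marc_record"]
  -- single pass: `st = (buckets, rest, seen)`; the inner fold over enumerate(priority_order)
  -- carries `(buckets, matched)` exactly as Source B's inner for-loop does
  let fin := rules.foldl
    (fun (st : List (List String) × List String × PySem.Set String) rule =>
      let p := (PySem.List.enumerate priority_order).foldl
        (fun (p : List (List String) × Bool) is =>
          if PySem.Str.isIn is.2 rule then (p.1.modify is.1.toNat (· ++ [rule]), true) else p)
        (st.1, false)
      if !p.2 && !(st.2.2.contains rule)
        then (p.1, st.2.1 ++ [rule], PySem.Set.add st.2.2 rule)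
        else (p.1, st.2.1, st.2.2))
    ([[], [], [], [], []], [], PySem.Set.empty)
  (fin.1.foldl (fun out b => out ++ b) []) ++ fin.2.1

-- ===== PRECONDITION & SPEC =====
def Spec_optimize_execution_order_py (rules : List String) (out : List String) : Prop := out = optimize_execution_order_py_alt rules
instance (rules : List String) (out : List String) : Decidable (Spec_optimize_execution_order_py rules out) := by unfold Spec_optimize_execution_order_py; infer_instance

-- ===== CLAIM (what is proved, stated in full; the proofs are below) =====
def Claim_equal_optimize_execution_order_py : Prop := ∀ (rules : List String), Dom_optimize_execution_order_py rules → Spec_optimize_execution_order_py rules (optimize_execution_order_py rules)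

-- ===== LEMMAS AND PROOFS =====

-- proof-only helpers: "rule contains some priority source", and the deduped non-matching remainder
def pvMatch (r : String) : Bool :=
  PySem.Str.isIn "vertex_ai_data" r || PySem.Str.isIn "google_books_data" r ||
  PySem.Str.isIn "loc_data" r || PySem.Str.isIn "open_library_data" r ||
  PySem.Str.isIn "marc_record" r

def pvRest : List String → PySem.Set String → List String
  | [], _ => []
  | r :: t, s =>
      if !(pvMatch r) && !(s.contains r) then r :: pvRest t (PySem.Set.add s r)
      else pvRest t s

-- one rule's inner pass over enumerate(priority_order): appends the rule to exactly the
-- matching buckets, and the flag becomes pvMatch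
theorem pv_inner (rule : String) (f1 f2 f3 f4 f5 : List String) :
    ((PySem.List.enumerate
        (["vertex_ai_data", "google_books_data", "loc_data", "open_library_data", "marc_record"] : List String)).foldl
      (fun (p : List (List String) × Bool) is =>
        if PySem.Str.isIn is.2 rule then (p.1.modify is.1.toNat (· ++ [rule]), true) else p)
      (([f1, f2, f3, f4, f5] : List (List String)), false))
    = ([f1 ++ (if PySem.Str.isIn "vertex_ai_data" rule then [rule] else []),
        f2 ++ (if PySem.Str.isIn "google_books_data" rule then [rule] else []),
        f3 ++ (if PySem.Str.isIn "loc_data" rule then [rule] else []),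
        f4 ++ (if PySem.Str.isIn "open_library_data" rule then [rule] else []),
        f5 ++ (if PySem.Str.isIn "marc_record" rule then [rule] else [])], pvMatch rule) := by
  cases h1 : PySem.Str.isIn "vertex_ai_data" rule <;>
  cases h2 : PySem.Str.isIn "google_books_data" rule <;>
  cases h3 : PySem.Str.isIn "loc_data" rule <;>
  cases h4 : PySem.Str.isIn "open_library_data" rule <;>
  cases h5 : PySem.Str.isIn "marc_record" rule <;>
    simp_all [PySem.List.enumerate_cons, PySem.List.enumerate_nil, List.modify, pvMatch]

-- the single pass as a whole: buckets become the per-source filters, the remainder becomes pvRest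
theorem pv_Bfold (rules : List String) : ∀ (f1 f2 f3 f4 f5 R : List String) (s : PySem.Set String),
    rules.foldl
      (fun (st : List (List String) × List String × PySem.Set String) rule =>
        let p := (PySem.List.enumerate
            (["vertex_ai_data", "google_books_data", "loc_data", "open_library_data", "marc_record"] : List String)).foldl
          (fun (p : List (List String) × Bool) is =>
            if PySem.Str.isIn is.2 rule then (p.1.modify is.1.toNat (· ++ [rule]), true) else p)
          (st.1, false)
        if !p.2 && !(st.2.2.contains rule)
          then (p.1, st.2.1 ++ [rule], PySem.Set.add st.2.2 rule)
          else (p.1, st.2.1, st.2.2))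
      ([f1, f2, f3, f4, f5], R, s)
    = ([f1 ++ rules.filter (fun r => PySem.Str.isIn "vertex_ai_data" r),
        f2 ++ rules.filter (fun r => PySem.Str.isIn "google_books_data" r),
        f3 ++ rules.filter (fun r => PySem.Str.isIn "loc_data" r),
        f4 ++ rules.filter (fun r => PySem.Str.isIn "open_library_data" r),
        f5 ++ rules.filter (fun r => PySem.Str.isIn "marc_record" r)],
       R ++ pvRest rules s, s ++ pvRest rules s) := by
  induction rules with
  | nil => intro f1 f2 f3 f4 f5 R s; simp [pvRest]
  | cons r t ih =>
      intro f1 f2 f3 f4 f5 R s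
      rw [List.foldl_cons]
      simp only [pv_inner]
      cases hm : pvMatch r with
      | true =>
          simp only [Bool.not_true, Bool.false_and, Bool.false_eq_true, if_false]
          rw [ih]
          simp [pvRest, hm, List.filter_cons, List.append_assoc]
          split_ifs <;> simp
      | false =>
          have hmm := hm
          simp only [pvMatch, Bool.or_eq_false_iff] at hmm
          obtain ⟨⟨⟨⟨e1, e2⟩, e3⟩, e4⟩, e5⟩ := hmm
          simp at e1 e2 e3 e4 e5
          cases hc : PySem.Set.contains s r with
          | true =>
              simp only [Bool.not_true, Bool.and_false, Bool.false_eq_true, if_false]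
              rw [ih]
              have hc' : r ∈ s := by simpa using hc
              simp [pvRest, hm, hc', e1, e2, e3, e4, e5]
          | false =>
              simp only [Bool.not_false, Bool.and_true, if_true]
              rw [ih]
              have hc' : r ∉ s := by simpa using hc
              simp [pvRest, hm, hc', List.append_assoc, e1, e2, e3, e4, e5]

-- A's remainder pass over a prefix P whose membership is pvMatch-or-seen equals P ++ pvRest
theorem pv_tail (rules : List String) : ∀ (P : List String) (s : PySem.Set String),
    (∀ r ∈ rules, P.contains r = (pvMatch r || PySem.Set.contains s r)) →
    rules.foldl (fun acc rule => if acc.contains rule then acc else acc ++ [rule]) P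
      = P ++ pvRest rules s := by
  induction rules with
  | nil => intro P s _; simp [pvRest]
  | cons r t ih =>
      intro P s hinv
      have hr := hinv r (by simp)
      rw [List.foldl_cons]
      cases hm : pvMatch r with
      | true =>
          have : P.contains r = true := by rw [hr, hm]; simp
          rw [this]
          simp only [if_true]
          rw [ih P s (fun x hx => hinv x (by simp [hx]))]
          simp [pvRest, hm]
      | false =>
          cases hc : PySem.Set.contains s r with
          | true =>
              have : P.contains r = true := by rw [hr, hm, hc]; simp
              rw [this]
              simp only [if_true]
              have hc' : r ∈ s := by simpa using hc
              rw [ih P s (fun x hx => hinv x (by simp [hx]))]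
              simp [pvRest, hm, hc']
          | false =>
              have hP : P.contains r = false := by rw [hr, hm, hc]; simp
              rw [hP]
              simp only [Bool.false_eq_true, if_false]
              have hc' : r ∉ s := by simpa using hc
              have hadd : PySem.Set.add s r = s ++ [r] := by simp [PySem.Set.add, hc']
              rw [ih (P ++ [r]) (PySem.Set.add s r) ?_]
              · simp [pvRest, hm, hc', List.append_assoc]
              · intro x hx
                have hxi := hinv x (by simp [hx])
                rw [hadd]
                simp only [PySem.Set.contains_eq_listContains] at hxi ⊢
                simp only [List.contains_eq_mem, List.mem_append, List.mem_singleton] at hxi ⊢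
                rw [Bool.decide_or, Bool.decide_or, hxi]
                cases pvMatch x <;> cases decide (x ∈ s) <;> cases decide (x = r) <;> simp

-- ===== VERDICT (by name: the statement is the Claim_ definition above) =====
theorem optimize_execution_order_py_spec : Claim_equal_optimize_execution_order_py := by
  intro rules _
  unfold Spec_optimize_execution_order_py optimize_execution_order_py optimize_execution_order_py_alt
  simp only []
  rw [pv_Bfold]
  simp only [List.foldl_cons, List.foldl_nil]
  rw [show (fun (acc : List String) rule => if PySem.Str.isIn "vertex_ai_data" rule then acc ++ [rule] else acc)
        = (fun acc x => if PySem.Str.isIn "vertex_ai_data" x then acc ++ [id x] else acc) from rfl,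
      PySem.List.foldl_append_if _ id,
      show (fun (acc : List String) rule => if PySem.Str.isIn "google_books_data" rule then acc ++ [rule] else acc)
        = (fun acc x => if PySem.Str.isIn "google_books_data" x then acc ++ [id x] else acc) from rfl,
      PySem.List.foldl_append_if _ id,
      show (fun (acc : List String) rule => if PySem.Str.isIn "loc_data" rule then acc ++ [rule] else acc)
        = (fun acc x => if PySem.Str.isIn "loc_data" x then acc ++ [id x] else acc) from rfl,
      PySem.List.foldl_append_if _ id,
      show (fun (acc : List String) rule => if PySem.Str.isIn "open_library_data" rule then acc ++ [rule] else acc)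
        = (fun acc x => if PySem.Str.isIn "open_library_data" x then acc ++ [id x] else acc) from rfl,
      PySem.List.foldl_append_if _ id,
      show (fun (acc : List String) rule => if PySem.Str.isIn "marc_record" rule then acc ++ [rule] else acc)
        = (fun acc x => if PySem.Str.isIn "marc_record" x then acc ++ [id x] else acc) from rfl,
      PySem.List.foldl_append_if _ id]
  simp only [List.map_id, List.nil_append]
  rw [pv_tail _ _ PySem.Set.empty ?_]
  · intro r hr
    simp only [PySem.Set.contains_eq_listContains, PySem.Set.empty]
    simp only [List.contains_eq_mem, List.mem_append, List.mem_filter, List.not_mem_nil,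
               decide_false, Bool.or_false, pvMatch]
    simp [hr]
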